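-- pv_equiv track=rewrite | github.com/popowu/Tweets_preprocessing | preprocessing_function.py | removeHash
-- ===== SOURCE A (Python) =====
-- def removeHash(tweet):
-- 	result = ''
-- 	for i in tweet.split(' '):
-- 		if i.startswith('#') or i.startswith('@'): #remove @ amd #
-- 			result += i[1:]
-- 			result += ' '
-- 		else:
-- 			result += i
-- 			result += ' '
-- 	return result
-- ===== SOURCE B (Python) =====
-- def removeHash(tweet):
--     # single pass over characters: drop a '#'/'@' that stands at the start
--     # of a space-split token; every token keeps its trailing space
--     out = []
--     start = True
--     for c in tweet:
--         if start and c in '#@':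
--             start = False
--         else:
--             out.append(c)
--             start = (c == ' ')
--     return ''.join(out) + ' '
-- ===== Notes on version B (the rewrite author's own statement) =====
-- stated objective: simpler
-- what changed: Replaces the split-on-space / strip-per-token / rebuild-with-appended-spaces loop by a single character scan with a token-start flag that drops exactly the one '#'/'@' opening each space-split token, then appends the one trailing space.
import Mathlib
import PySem

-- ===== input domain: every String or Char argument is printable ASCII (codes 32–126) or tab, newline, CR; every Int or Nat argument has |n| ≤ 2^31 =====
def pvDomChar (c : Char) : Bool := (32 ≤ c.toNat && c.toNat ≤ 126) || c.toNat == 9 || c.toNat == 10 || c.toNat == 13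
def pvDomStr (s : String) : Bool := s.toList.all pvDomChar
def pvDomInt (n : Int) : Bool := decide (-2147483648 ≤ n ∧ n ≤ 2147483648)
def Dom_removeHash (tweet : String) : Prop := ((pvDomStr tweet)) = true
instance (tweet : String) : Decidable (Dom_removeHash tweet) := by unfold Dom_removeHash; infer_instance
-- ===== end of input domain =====

-- B replaces A's split/strip/rebuild token loop by a single character scan with a
-- token-start flag (simpler, same O(n) cost).

-- ===== PORT A =====
-- tokens are List Char; the fold mirrors A's `result += …; result += ' '` loop
def removeHash (tweet : String) : String :=
  String.ofList
    ((PySem.Chars.splitOn tweet.toList [' ']).foldl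
      (fun result i =>
        if PySem.Chars.startswith i ['#'] || PySem.Chars.startswith i ['@'] then
          result ++ PySem.Chars.slice i (some 1) none ++ [' ']
        else
          result ++ i ++ [' '])
      [])

-- ===== PORT B =====
-- the `for c in tweet` loop of Source B: `start` is the token-start flag
def removeHashScan : Bool → List Char → List Char
  | _, [] => []
  | start, c :: cs =>
    if start && (c == '#' || c == '@') then removeHashScan false cs
    else c :: removeHashScan (c == ' ') cs

def removeHash_alt (tweet : String) : String :=
  String.ofList (removeHashScan true tweet.toList ++ [' '])

-- ===== PRECONDITION & SPEC =====
def Spec_removeHash (tweet : String) (out : String) : Prop := out = removeHash_alt tweet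
instance (tweet : String) (out : String) : Decidable (Spec_removeHash tweet out) := by unfold Spec_removeHash; infer_instance

-- ===== CLAIM (what is proved, stated in full; the proofs are below) =====
def Claim_equal_removeHash : Prop := ∀ (tweet : String), Dom_removeHash tweet → Spec_removeHash tweet (removeHash tweet)

-- ===== LEMMAS AND PROOFS =====

-- structural form of splitOn l [' ']: first token and remaining tokens
def splitSp : List Char → List Char × List (List Char)
  | [] => ([], [])
  | c :: r =>
    let p := splitSp r
    if c = ' ' then ([], p.1 :: p.2) else (c :: p.1, p.2)

-- one token, A-processed
def stripTok (i : List Char) : List Char :=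
  if PySem.Chars.startswith i ['#'] || PySem.Chars.startswith i ['@'] then
    PySem.Chars.slice i (some 1) none ++ [' ']
  else i ++ [' ']

lemma splitOn_go_eq : ∀ (fuel : Nat) (l cur : List Char) (accs : List (List Char)),
    l.length < fuel →
    PySem.Chars.splitOn.go [' '] fuel l cur accs
      = accs.reverse ++ (cur.reverse ++ (splitSp l).1) :: (splitSp l).2 := by
  intro fuel
  induction fuel with
  | zero => intro l cur accs h; omega
  | succ n ih =>
    intro l cur accs h
    cases l with
    | nil =>
      rw [PySem.Chars.splitOn.go]
      · simp [splitSp]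
      · omega
    | cons c rest =>
      by_cases hc : c = ' '
      · subst hc
        have hpre : [' '].isPrefixOf (' ' :: rest) = true := by simp [List.isPrefixOf]
        rw [PySem.Chars.splitOn.go, if_pos hpre]
        have := ih rest [] (cur.reverse :: accs) (by simpa using Nat.lt_of_succ_lt_succ h)
        simp only [List.length_singleton, List.drop_succ_cons, List.drop_zero]
        rw [this]
        simp [splitSp]
      · have hpre : [' '].isPrefixOf (c :: rest) = false := by
          have : (' ' == c) = false := by
            simp only [beq_eq_false_iff_ne, ne_eq]
            exact fun h => hc h.symm
          simp [List.isPrefixOf, this]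
        rw [PySem.Chars.splitOn.go, if_neg (by simp [hpre])]
        have := ih rest (c :: cur) accs (by simpa using Nat.lt_of_succ_lt_succ h)
        simp [this, splitSp, hc]

lemma splitOn_eq_splitSp (l : List Char) :
    PySem.Chars.splitOn l [' '] = (splitSp l).1 :: (splitSp l).2 := by
  have := splitOn_go_eq (l.length + 1) l [] [] (by omega)
  simpa [PySem.Chars.splitOn] using this

-- A's fold appends each processed token to the accumulator
lemma foldA_eq (ts : List (List Char)) : ∀ (acc : List Char),
    ts.foldl
      (fun result i =>
        if PySem.Chars.startswith i ['#'] || PySem.Chars.startswith i ['@'] then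
          result ++ PySem.Chars.slice i (some 1) none ++ [' ']
        else result ++ i ++ [' '])
      acc
      = acc ++ ts.flatMap stripTok := by
  induction ts with
  | nil => intro acc; simp
  | cons t ts ih =>
    intro acc
    simp only [List.foldl_cons, List.flatMap_cons, ih, stripTok]
    split_ifs <;> simp

-- B's scan from the non-start state: the first token is emitted untouched
def flatNoFirst (p : List Char × List (List Char)) : List Char :=
  p.1 ++ [' '] ++ p.2.flatMap stripTok

def flatStrip (p : List Char × List (List Char)) : List Char :=
  stripTok p.1 ++ p.2.flatMap stripTok

lemma scan_splitSp : ∀ (l : List Char),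
    flatStrip (splitSp l) = removeHashScan true l ++ [' ']
    ∧ flatNoFirst (splitSp l) = removeHashScan false l ++ [' '] := by
  intro l
  induction l with
  | nil =>
    constructor <;>
      simp [splitSp, flatStrip, flatNoFirst, stripTok, removeHashScan,
        PySem.Chars.startswith]
  | cons c r ih =>
    obtain ⟨ih1, ih2⟩ := ih
    by_cases hsp : c = ' '
    · subst hsp
      constructor <;>
        simp [splitSp, flatStrip, flatNoFirst, stripTok, removeHashScan,
          PySem.Chars.startswith, ← ih1]
    · have hb : (c == ' ') = false := by simp [hsp]
      by_cases hha : c = '#' ∨ c = '@'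
      · constructor
        · -- start state: the leading '#'/'@' is dropped
          have hsl : PySem.List.slice (c :: (splitSp r).1) (some 1) none = (splitSp r).1 := by
            simp [pysem]
          rcases hha with h | h <;> subst h <;>
            simp [splitSp, flatStrip, flatNoFirst, stripTok, removeHashScan,
              PySem.Chars.startswith, List.isPrefixOf, hsl, ← ih2]
        · rcases hha with h | h <;> subst h <;>
            simp [splitSp, flatNoFirst, removeHashScan, hb, ← ih2]
      · obtain ⟨h1, h2⟩ := not_or.mp hha
        constructor
        · simp [splitSp, flatStrip, flatNoFirst, stripTok, removeHashScan,
            PySem.Chars.startswith, List.isPrefixOf, hsp, h1, h2, Ne.symm h1, Ne.symm h2, hb, ← ih2]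
        · simp [splitSp, flatNoFirst, removeHashScan, hsp, hb, ← ih2]

-- ===== VERDICT (by name: the statement is the Claim_ definition above) =====
theorem removeHash_spec : Claim_equal_removeHash := by
  intro tweet _
  unfold Spec_removeHash removeHash removeHash_alt
  rw [splitOn_eq_splitSp, foldA_eq]
  have := (scan_splitSp tweet.toList).1
  simp only [flatStrip, List.flatMap_cons] at this ⊢
  simp [this]
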